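-- pv_equiv track=rewrite | github.com/ByJeJox/Semana-Integracion-2 | Trabajo de Integracion Semana 2/dni_alumnos.py | diferencia_simetrica
-- ===== SOURCE A (Python) =====
-- def diferencia_simetrica(conjunto1, conjunto2):
--     conjunto_diferencia_simetrica = []
--     for i in conjunto1:
--         if i not in conjunto2 and i not in conjunto_diferencia_simetrica:
--             conjunto_diferencia_simetrica.append(i)
--
--     for i in conjunto2:
--         if i not in conjunto1 and i not in conjunto_diferencia_simetrica:
--             conjunto_diferencia_simetrica.append(i)
--
--     return conjunto_diferencia_simetrica
-- ===== SOURCE B (Python) =====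
-- def diferencia_simetrica(conjunto1, conjunto2):
--     combinado = list(conjunto1) + list(conjunto2)
--     diff = set(conjunto1) ^ set(conjunto2)
--     return sorted(diff, key=combinado.index)
-- ===== Notes on version B (the rewrite author's own statement) =====
-- stated objective: alternative
-- what changed: B builds no result list by scanning: it computes the symmetric difference with set algebra and then sorts those distinct elements by their first index in conjunto1+conjunto2, whereas A grows a list with two nested membership-scan loops.
import Mathlib
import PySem

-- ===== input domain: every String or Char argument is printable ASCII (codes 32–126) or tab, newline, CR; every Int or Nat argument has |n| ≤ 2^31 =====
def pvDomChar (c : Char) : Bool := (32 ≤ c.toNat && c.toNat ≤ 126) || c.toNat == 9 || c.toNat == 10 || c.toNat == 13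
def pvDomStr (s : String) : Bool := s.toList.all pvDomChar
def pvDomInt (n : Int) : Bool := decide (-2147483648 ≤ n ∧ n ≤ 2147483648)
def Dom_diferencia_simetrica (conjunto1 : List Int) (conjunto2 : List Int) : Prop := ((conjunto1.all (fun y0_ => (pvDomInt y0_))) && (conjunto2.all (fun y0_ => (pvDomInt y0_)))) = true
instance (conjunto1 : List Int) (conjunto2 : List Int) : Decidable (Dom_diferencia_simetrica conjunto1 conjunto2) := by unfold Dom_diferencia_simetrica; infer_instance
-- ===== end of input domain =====

-- B computes the symmetric difference by set algebra and sorts its distinct elements by their first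
-- index in conjunto1+conjunto2, instead of A's two membership-scan append loops (objective: alternative).


-- ===== PORT A =====
def diferencia_simetrica (conjunto1 : List Int) (conjunto2 : List Int) : List Int :=
  let r1 := conjunto1.foldl
    (fun acc i => if !(conjunto2.contains i) && !(acc.contains i) then acc ++ [i] else acc) []
  conjunto2.foldl
    (fun acc i => if !(conjunto1.contains i) && !(acc.contains i) then acc ++ [i] else acc) r1

-- ===== PORT B =====
-- sorted(set(c1) ^ set(c2), key=combinado.index); every element of the symmetric difference occurs in
-- combinado, so Python's .index never raises: index? is always `some` here and the .getD default is never used.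
def diferencia_simetrica_alt (conjunto1 : List Int) (conjunto2 : List Int) : List Int :=
  let combinado := conjunto1 ++ conjunto2
  let diff := PySem.Set.symmDiff (PySem.Set.ofList conjunto1) (PySem.Set.ofList conjunto2)
  PySem.List.sorted diff (fun x => (PySem.List.index? combinado x).getD combinado.length) false

-- ===== PRECONDITION & SPEC =====
def Spec_diferencia_simetrica (conjunto1 : List Int) (conjunto2 : List Int) (out : List Int) : Prop := out = diferencia_simetrica_alt conjunto1 conjunto2
instance (conjunto1 : List Int) (conjunto2 : List Int) (out : List Int) : Decidable (Spec_diferencia_simetrica conjunto1 conjunto2 out) := by unfold Spec_diferencia_simetrica; infer_instance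

-- ===== CLAIM =====
def Claim_equal_diferencia_simetrica : Prop := ∀ (conjunto1 : List Int) (conjunto2 : List Int), Dom_diferencia_simetrica conjunto1 conjunto2 → Spec_diferencia_simetrica conjunto1 conjunto2 (diferencia_simetrica conjunto1 conjunto2)

-- ===== LEMMAS AND PROOFS =====

-- A's append-if fold, rewritten as a structural "first unseen occurrences satisfying cond" recursion.
def pvAux (cond : Int → Bool) (seen : List Int) : List Int → List Int
  | [] => []
  | x :: xs => if cond x && !(seen.contains x) then x :: pvAux cond (x :: seen) xs else pvAux cond seen xs

theorem pvAux_congr (cond : Int → Bool) (xs : List Int) :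
    ∀ s t : List Int, (∀ y, s.contains y = t.contains y) → pvAux cond s xs = pvAux cond t xs := by
  induction xs with
  | nil => intro s t _; rfl
  | cons x xs ih =>
    intro s t h
    simp only [pvAux, h x]
    by_cases hc : (cond x && !(t.contains x)) = true
    · rw [if_pos hc, if_pos hc, ih (x :: s) (x :: t) (fun y => by
        have := h y; simp [List.contains_eq_mem] at this ⊢; simp [this])]
    · rw [if_neg hc, if_neg hc, ih s t h]

theorem pvFold_eq_aux (cond : Int → Bool) (xs : List Int) :
    ∀ acc : List Int,
      xs.foldl (fun a i => if cond i && !(a.contains i) then a ++ [i] else a) acc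
        = acc ++ pvAux cond acc xs := by
  induction xs with
  | nil => intro acc; simp [pvAux]
  | cons x xs ih =>
    intro acc
    simp only [List.foldl_cons, pvAux]
    by_cases hc : (cond x && !(acc.contains x)) = true
    · rw [if_pos hc, if_pos hc, ih (acc ++ [x]),
        pvAux_congr cond xs (acc ++ [x]) (x :: acc) (fun y => by simp [List.contains_eq_mem, Bool.or_comm])]
      simp
    · rw [if_neg hc, if_neg hc, ih acc]

theorem pvAux_mem (cond : Int → Bool) (xs : List Int) :
    ∀ (seen : List Int) (y : Int),
      y ∈ pvAux cond seen xs ↔ cond y = true ∧ y ∈ xs ∧ y ∉ seen := by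
  induction xs with
  | nil => intro seen y; simp [pvAux]
  | cons x xs ih =>
    intro seen y
    simp only [pvAux]
    by_cases hc : (cond x && !(seen.contains x)) = true
    · rw [if_pos hc]
      rcases Bool.and_eq_true .. |>.mp hc with ⟨hcx, hnx⟩
      have hxs : x ∉ seen := by simpa using hnx
      constructor
      · intro hy
        rcases List.mem_cons.mp hy with rfl | hy
        · exact ⟨hcx, by simp, hxs⟩
        · rcases (ih (x :: seen) y).mp hy with ⟨h1, h2, h3⟩
          exact ⟨h1, by simp [h2], fun h => h3 (by simp [h])⟩
      · rintro ⟨h1, h2, h3⟩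
        rcases List.mem_cons.mp h2 with rfl | h2
        · exact List.mem_cons_self
        · by_cases hyx : y = x
          · subst hyx; exact List.mem_cons_self
          · exact List.mem_cons_of_mem _ ((ih (x :: seen) y).mpr ⟨h1, h2, by simp [hyx, h3]⟩)
    · rw [if_neg hc]
      rw [ih seen y]
      constructor
      · rintro ⟨h1, h2, h3⟩; exact ⟨h1, List.mem_cons_of_mem _ h2, h3⟩
      · rintro ⟨h1, h2, h3⟩
        rcases List.mem_cons.mp h2 with rfl | h2
        · exfalso; apply hc; simp [h1]; simpa [List.contains_eq_mem] using h3
        · exact ⟨h1, h2, h3⟩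

theorem pvAux_nodup (cond : Int → Bool) (xs : List Int) :
    ∀ seen : List Int, (pvAux cond seen xs).Nodup := by
  induction xs with
  | nil => intro seen; simp [pvAux]
  | cons x xs ih =>
    intro seen
    simp only [pvAux]
    by_cases hc : (cond x && !(seen.contains x)) = true
    · rw [if_pos hc]
      refine List.nodup_cons.mpr ⟨fun h => ?_, ih (x :: seen)⟩
      rcases (pvAux_mem cond xs (x :: seen) x).mp h with ⟨_, _, h3⟩
      exact h3 (by simp)
    · rw [if_neg hc]; exact ih seen

-- (List.idxOf? v xs).getD d = xs.idxOf v whenever v ∈ xs (exact?/simp? find no library name).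
theorem pvIdxOfGetD (xs : List Int) (v : Int) (d : Nat) (h : v ∈ xs) :
    (List.idxOf? v xs).getD d = xs.idxOf v := by
  induction xs with
  | nil => cases h
  | cons x xs ih =>
    by_cases hx : x = v
    · subst hx; simp [List.idxOf?_cons, List.idxOf_cons_self]
    · have hv : v ∈ xs := by rcases List.mem_cons.mp h with rfl | h'; exact absurd rfl hx; exact h'
      rw [List.idxOf?_cons, if_neg (by simpa using hx), List.idxOf_cons_ne _ hx]
      obtain ⟨k, hk⟩ : ∃ k, List.idxOf? v xs = some k := Option.isSome_iff_exists.mp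
        (Option.isSome_iff_ne_none.mpr (by simp [List.idxOf?_eq_none_iff, hv]))
      have hik := ih hv
      rw [hk] at hik ⊢
      simp at hik
      simp [hik, Nat.succ_eq_add_one]

theorem pvIdxOfPrefix (pre xs : List Int) (x : Int) :
    (pre ++ x :: xs).idxOf x ≤ pre.length := by
  induction pre with
  | nil => simp [List.idxOf_cons_self]
  | cons p pre ih =>
    by_cases hp : p = x
    · subst hp; simp [List.idxOf_cons_self]
    · rw [List.cons_append, List.idxOf_cons_ne _ hp]
      simpa using Nat.succ_le_succ ih

theorem pvAux_pairwise (cond : Int → Bool) (xs : List Int) :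
    ∀ (pre seen : List Int), (∀ y, cond y = true → y ∈ pre → y ∈ seen) →
      (pvAux cond seen xs).Pairwise (fun a b => (pre ++ xs).idxOf a < (pre ++ xs).idxOf b) := by
  induction xs with
  | nil => intro pre seen _; simp [pvAux]
  | cons x xs ih =>
    intro pre seen hinv
    have hsplit : pre ++ x :: xs = (pre ++ [x]) ++ xs := by simp
    simp only [pvAux]
    by_cases hc : (cond x && !(seen.contains x)) = true
    · rw [if_pos hc]
      refine List.pairwise_cons.mpr ⟨?_, ?_⟩
      · intro b hb
        rcases (pvAux_mem cond xs (x :: seen) b).mp hb with ⟨hcb, hbxs, hbn⟩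
        have hbx : b ≠ x := fun h => hbn (by simp [h])
        have hbseen : b ∉ seen := fun h => hbn (by simp [h])
        have hbpre : b ∉ pre := fun h => hbseen (hinv b hcb h)
        have h1 : (pre ++ x :: xs).idxOf x ≤ pre.length := pvIdxOfPrefix pre xs x
        have h2 : (pre ++ x :: xs).idxOf b = pre.length + (x :: xs).idxOf b :=
          List.idxOf_append_of_notMem hbpre
        have h3 : (x :: xs).idxOf b = (xs.idxOf b).succ := List.idxOf_cons_ne _ (Ne.symm hbx)
        omega
      · rw [hsplit]
        exact ih (pre ++ [x]) (x :: seen) (by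
          intro y hy hmem
          rcases List.mem_append.mp hmem with h | h
          · exact List.mem_cons_of_mem _ (hinv y hy h)
          · simp at h; simp [h])
    · rw [if_neg hc, hsplit]
      refine ih (pre ++ [x]) seen ?_
      intro y hy hmem
      rcases List.mem_append.mp hmem with h | h
      · exact hinv y hy h
      · simp at h; subst h
        by_contra hys
        exact hc (by simp [hy]; simpa [List.contains_eq_mem] using hys)

-- ===== VERDICT =====
theorem diferencia_simetrica_spec : Claim_equal_diferencia_simetrica := by
  intro c1 c2 _
  simp only [Spec_diferencia_simetrica, diferencia_simetrica, diferencia_simetrica_alt]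
  set comb := c1 ++ c2 with hcomb
  set diffS := PySem.Set.symmDiff (PySem.Set.ofList c1) (PySem.Set.ofList c2) with hdiffS
  set condS : Int → Bool := fun x => diffS.contains x with hcondS
  -- A's two folds compute the single fold over comb with the symmetric-difference test
  have hdm : ∀ x : Int, x ∈ diffS ↔ ((x ∈ c1 ∧ x ∉ c2) ∨ (x ∈ c2 ∧ x ∉ c1)) := by
    intro x; simp [hdiffS, PySem.Set.mem_symmDiff, PySem.Set.mem_ofList]
  have e1 : c1.foldl (fun a x => if !(c2.contains x) && !(a.contains x) then a ++ [x] else a) ([] : List Int)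
      = c1.foldl (fun a x => if condS x && !(a.contains x) then a ++ [x] else a) [] := by
    apply PySem.List.foldl_congr_mem
    intro a x hx
    have : condS x = !(c2.contains x) := by
      by_cases hm : x ∈ c2
      · have : x ∉ diffS := fun hd => ((hdm x).mp hd).elim (fun p => p.2 hm) (fun p => p.2 hx)
        simp [hcondS, PySem.Set.contains, this, hm]
      · have : x ∈ diffS := (hdm x).mpr (Or.inl ⟨hx, hm⟩)
        simp [hcondS, PySem.Set.contains, this, hm]
    rw [this]
  have e2 : ∀ r : List Int,
      c2.foldl (fun a x => if !(c1.contains x) && !(a.contains x) then a ++ [x] else a) r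
      = c2.foldl (fun a x => if condS x && !(a.contains x) then a ++ [x] else a) r := by
    intro r
    apply PySem.List.foldl_congr_mem
    intro a x hx
    have : condS x = !(c1.contains x) := by
      by_cases hm : x ∈ c1
      · have : x ∉ diffS := fun hd => ((hdm x).mp hd).elim (fun p => p.2 hx) (fun p => p.2 hm)
        simp [hcondS, PySem.Set.contains, this, hm]
      · have : x ∈ diffS := (hdm x).mpr (Or.inr ⟨hx, hm⟩)
        simp [hcondS, PySem.Set.contains, this, hm]
    rw [this]
  rw [e1, e2, ← List.foldl_append, ← hcomb, pvFold_eq_aux, List.nil_append]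
  set L := pvAux condS [] comb with hL
  -- L is exactly sorted(diffS, key = first index in comb)
  have hmemL : ∀ y, y ∈ L ↔ y ∈ diffS := by
    intro y
    rw [hL, pvAux_mem]
    constructor
    · rintro ⟨h1, _, _⟩; simpa [hcondS, PySem.Set.contains] using h1
    · intro h
      refine ⟨by simpa [hcondS, PySem.Set.contains] using h, ?_, by simp⟩
      rcases (hdm y).mp h with ⟨h1, _⟩ | ⟨h1, _⟩ <;> simp [hcomb, h1]
  have hnodupD : diffS.Nodup := PySem.Set.nodup_symmDiff _ _ (PySem.Set.nodup_ofList c1) (PySem.Set.nodup_ofList c2)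
  have hperm : L.Perm diffS :=
    (List.perm_ext_iff_of_nodup (pvAux_nodup condS comb []) hnodupD).mpr hmemL
  have hpwIdx : L.Pairwise (fun a b => comb.idxOf a < comb.idxOf b) := by
    have := pvAux_pairwise condS comb [] [] (by intro y _ h; cases h)
    simpa [hL] using this
  have hsubL : ∀ y ∈ L, y ∈ comb := by
    intro y hy
    rcases (hdm y).mp ((hmemL y).mp hy) with ⟨h1, _⟩ | ⟨h1, _⟩ <;> simp [hcomb, h1]
  have hpwKey : L.Pairwise (fun a b =>
      (PySem.List.index? comb a).getD comb.length < (PySem.List.index? comb b).getD comb.length) := by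
    refine hpwIdx.imp_of_mem ?_
    intro a b ha hb hlt
    rw [PySem.List.index?_eq_idxOf?, PySem.List.index?_eq_idxOf?,
      pvIdxOfGetD comb a _ (hsubL a ha), pvIdxOfGetD comb b _ (hsubL b hb)]
    exact hlt
  exact Eq.symm (PySem.List.sorted_eq_of_perm_of_pairwise_lt diffS L _ hperm hpwKey)
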